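-- pv_equiv track=rewrite | github.com/JLefebvre55/ESC180-Labs | lab5.py | list1_start_with_list2
-- ===== SOURCE A (Python) =====
-- def list1_start_with_list2(list1, list2):
--     '''
--     Problem 1
--     Does list1 start with list2?
--     '''
--     if(len(list1) < len(list2)):
--         return False
--     else:
--         for c in range(len(list2)):
--             if(list1[c]!=list2[c]):
--                 return False
--         return True
-- ===== SOURCE B (Python) =====
-- def list1_start_with_list2(list1, list2):
--     '''
--     Problem 1
--     Does list1 start with list2?
--     '''
--     return list(list1[:len(list2)]) == list(list2)
-- ===== Notes on version B (the rewrite author's own statement) =====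
-- stated objective: idiomatic
-- what changed: Replaces the explicit length guard and indexed loop with a single slice-and-compare: list(list1[:len(list2)]) == list(list2).
import Mathlib
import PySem

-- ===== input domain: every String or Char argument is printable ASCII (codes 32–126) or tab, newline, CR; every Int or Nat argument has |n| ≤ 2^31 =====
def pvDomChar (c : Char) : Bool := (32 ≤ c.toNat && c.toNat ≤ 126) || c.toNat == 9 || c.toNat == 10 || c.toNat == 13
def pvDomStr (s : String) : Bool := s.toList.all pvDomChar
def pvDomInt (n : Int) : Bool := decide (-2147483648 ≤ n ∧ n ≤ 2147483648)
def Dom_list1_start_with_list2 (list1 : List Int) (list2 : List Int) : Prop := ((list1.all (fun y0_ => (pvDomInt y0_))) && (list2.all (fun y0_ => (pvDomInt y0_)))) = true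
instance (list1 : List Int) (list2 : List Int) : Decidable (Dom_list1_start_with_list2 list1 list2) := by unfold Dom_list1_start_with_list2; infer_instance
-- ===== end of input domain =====

-- B replaces A's length guard and indexed loop by a single slice-and-compare (idiomatic; same cost).

-- ===== PORT A =====
-- the 'for c in range(len(list2))' loop with its early 'return False';
-- indices c are always in range here (the caller checked len(list1) ≥ len(list2)), so getD is exact
def pvLoopA (list1 list2 : List Int) (c : Nat) : Bool :=
  if c < list2.length then
    if list1.getD c 0 ≠ list2.getD c 0 then false
    else pvLoopA list1 list2 (c + 1)
  else true
termination_by list2.length - c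

def list1_start_with_list2 (list1 : List Int) (list2 : List Int) : Bool :=
  if list1.length < list2.length then false
  else pvLoopA list1 list2 0

-- ===== PORT B =====
def list1_start_with_list2_alt (list1 : List Int) (list2 : List Int) : Bool :=
  PySem.List.slice list1 none (some (list2.length : Int)) == list2

-- ===== PRECONDITION & SPEC =====
def Spec_list1_start_with_list2 (list1 : List Int) (list2 : List Int) (out : Bool) : Prop := out = list1_start_with_list2_alt list1 list2
instance (list1 : List Int) (list2 : List Int) (out : Bool) : Decidable (Spec_list1_start_with_list2 list1 list2 out) := by unfold Spec_list1_start_with_list2; infer_instance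

-- ===== CLAIM (what is proved, stated in full; the proofs are below) =====
def Claim_equal_list1_start_with_list2 : Prop := ∀ (list1 : List Int) (list2 : List Int), Dom_list1_start_with_list2 list1 list2 → Spec_list1_start_with_list2 list1 list2 (list1_start_with_list2 list1 list2)

-- ===== LEMMAS AND PROOFS =====

lemma pvLoopA_eq (list1 list2 : List Int) (h : list2.length ≤ list1.length) (c : Nat) :
    pvLoopA list1 list2 c = ((list1.drop c).take (list2.length - c) == list2.drop c) := by
  by_cases hc : c < list2.length
  · have hc1 : c < list1.length := lt_of_lt_of_le hc h
    rw [pvLoopA, if_pos hc]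
    have ih := pvLoopA_eq list1 list2 h (c + 1)
    have hd1 : list1.drop c = list1[c] :: list1.drop (c + 1) := List.drop_eq_getElem_cons hc1
    have hd2 : list2.drop c = list2[c] :: list2.drop (c + 1) := List.drop_eq_getElem_cons hc
    have hsub : list2.length - c = (list2.length - (c + 1)) + 1 := by omega
    rw [hd1, hd2, hsub, List.take_succ_cons, List.cons_beq_cons]
    rw [List.getD_eq_getElem list1 0 hc1, List.getD_eq_getElem list2 0 hc]
    by_cases he : list1[c] = list2[c]
    · simp [he, ih]
    · simp [he]
  · rw [pvLoopA, if_neg hc]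
    have : list2.length - c = 0 := by omega
    rw [this, List.take_zero, List.drop_eq_nil_of_le (le_of_not_gt hc)]
    rfl
termination_by list2.length - c
decreasing_by omega

-- ===== VERDICT (by name: the statement is the Claim_ definition above) =====
theorem list1_start_with_list2_spec : Claim_equal_list1_start_with_list2 := by
  intro list1 list2 _
  unfold Spec_list1_start_with_list2 list1_start_with_list2 list1_start_with_list2_alt
  rw [PySem.List.slice_to_natCast]
  by_cases h : list1.length < list2.length
  · rw [if_pos h]
    have hlen : (list1.take list2.length).length ≠ list2.length := by
      rw [List.length_take]; omega
    have : list1.take list2.length ≠ list2 := fun he => hlen (by rw [he])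
    simp [this]
  · rw [if_neg h]
    have := pvLoopA_eq list1 list2 (by omega) 0
    simpa using this
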